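-- pv_equiv track=rewrite | github.com/Dosx001/CPE-101 | labs/pset5.py | decode_ascii
-- ===== SOURCE A (Python) =====
-- def decode_ascii(x):
-- 	num = ''
-- 	final = ''
-- 	n = 0
-- 	for i in x:
-- 		num = num + i
-- 		n += 1
-- 		if n == 3:
-- 			n = 0
-- 			final = final + chr(int(num))
-- 			num = ''
-- 	return final
-- ===== SOURCE B (Python) =====
-- def decode_ascii(x):
--     return ''.join(chr(int(x[i:i + 3])) for i in range(0, len(x) // 3 * 3, 3))
-- ===== Notes on version B (the rewrite author's own statement) =====
-- stated objective: idiomatic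
-- what changed: B slices each 3-char block directly by index with a stride-3 range and joins the decoded chars in one expression, instead of A's per-character loop that accumulates a buffer string and a modulo counter; the trailing partial block is dropped by the len(x)//3*3 bound rather than by leftover buffer state.
import Mathlib
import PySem

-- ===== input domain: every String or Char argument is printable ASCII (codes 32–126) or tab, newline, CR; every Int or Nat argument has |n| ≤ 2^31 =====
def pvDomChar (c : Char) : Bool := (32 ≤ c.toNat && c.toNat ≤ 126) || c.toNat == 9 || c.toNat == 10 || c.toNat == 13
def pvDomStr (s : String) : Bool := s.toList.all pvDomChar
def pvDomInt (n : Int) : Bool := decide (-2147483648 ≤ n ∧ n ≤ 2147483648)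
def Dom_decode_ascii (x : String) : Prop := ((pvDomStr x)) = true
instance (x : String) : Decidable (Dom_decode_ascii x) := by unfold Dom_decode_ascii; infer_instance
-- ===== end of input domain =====

-- B replaces A's per-character buffer/counter loop with a stride-3 index range that
-- slices each 3-char block directly and joins the decoded characters (idiomatic).


-- ===== PORT A =====
-- chr(int(num)): `int` via PySem.Int.ofChars?; outside Pre_ (parse failure / negative) Python
-- raises, the port's `.getD 0` fallback value is never claimed about.
def pyChrOfBlock (blk : List Char) : Char :=
  Char.ofNat ((PySem.Int.ofChars? blk).getD 0).toNat

-- A's loop: state (num buffer, final output, counter n), one step per character.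
def aGo : List Char → List Char → List Char → Int → List Char
  | [], _, final, _ => final
  | i :: rest, num, final, n =>
    if n + 1 = 3 then aGo rest [] (final ++ [pyChrOfBlock (num ++ [i])]) 0
    else aGo rest (num ++ [i]) final (n + 1)

def decode_ascii (x : String) : String :=
  String.ofList (aGo x.toList [] [] 0)

-- ===== PORT B =====
def decode_ascii_alt (x : String) : String :=
  let cs := x.toList
  String.ofList ((PySem.List.pyRange 0 (PySem.Int.floordiv (cs.length : Int) 3 * 3) 3).map
    (fun i => pyChrOfBlock (PySem.List.slice cs (some i) (some (i + 3)))))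

-- ===== PRECONDITION & SPEC =====
-- Pre_ excludes exactly the inputs where Python A raises: some full 3-char block is not a
-- valid int literal (ValueError) or parses to a negative code (chr ValueError).
def Pre_decode_ascii (x : String) : Prop :=
  ∀ k ∈ List.range (x.toList.length / 3),
    0 ≤ (PySem.Int.ofChars? ((x.toList.drop (3 * k)).take 3)).getD (-1)
instance (x : String) : Decidable (Pre_decode_ascii x) := by unfold Pre_decode_ascii; infer_instance

def pvWitness_decode_ascii : String := "0650661"

def Spec_decode_ascii (x : String) (out : String) : Prop := out = decode_ascii_alt x
instance (x : String) (out : String) : Decidable (Spec_decode_ascii x out) := by unfold Spec_decode_ascii; infer_instance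

-- ===== CLAIM (what is proved, stated in full; the proofs are below) =====
def Claim_equal_decode_ascii : Prop := ∀ (x : String), Dom_decode_ascii x → Pre_decode_ascii x → Spec_decode_ascii x (decode_ascii x)

-- ===== LEMMAS AND PROOFS =====

-- reference: the decoded characters, three input chars at a time
def chunks : List Char → List Char
  | [] => []
  | [_] => []
  | [_, _] => []
  | a :: b :: c :: rest => pyChrOfBlock [a, b, c] :: chunks rest

lemma aGo_eq_chunks (cs : List Char) : ∀ final, aGo cs [] final 0 = final ++ chunks cs := by
  induction cs using chunks.induct with
  | case1 => intro final; simp [aGo, chunks]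
  | case2 a => intro final; simp [aGo, chunks]
  | case3 a b => intro final; simp [aGo, chunks]
  | case4 a b c rest ih =>
    intro final
    simp only [aGo, chunks]
    norm_num
    rw [ih]
    simp

lemma chunks_eq_map (cs : List Char) :
    chunks cs = (List.range (cs.length / 3)).map
      (fun k => pyChrOfBlock ((cs.drop (3 * k)).take 3)) := by
  induction cs using chunks.induct with
  | case1 => simp [chunks]
  | case2 a => simp [chunks]
  | case3 a b => simp [chunks]
  | case4 a b c rest ih =>
    have hlen : (a :: b :: c :: rest).length / 3 = rest.length / 3 + 1 := by
      simp only [List.length_cons]; omega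
    rw [chunks, hlen, List.range_succ_eq_map, List.map_cons, List.map_map, ih]
    simp only [List.cons.injEq]
    refine ⟨rfl, ?_⟩
    apply List.map_congr_left
    intro k _
    have h31 : 3 * (k + 1) = 3 * k + 1 + 1 + 1 := by ring
    simp [Function.comp, h31, List.drop_succ_cons]

theorem decode_ascii_spec : Claim_equal_decode_ascii := by
  intro x _ _
  unfold Spec_decode_ascii decode_ascii decode_ascii_alt
  set cs := x.toList with hcs
  congr 1
  rw [aGo_eq_chunks cs [], List.nil_append, chunks_eq_map]
  have h3 : PySem.Int.floordiv (cs.length : Int) 3 = ((cs.length / 3 : Nat) : Int) := by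
    exact_mod_cast PySem.Int.floordiv_natCast cs.length 3
  rw [h3]
  have hb : ((cs.length / 3 : Nat) : Int) * 3 = ((cs.length / 3 * 3 : Nat) : Int) := by
    push_cast; ring
  rw [hb, PySem.List.pyRange_of_pos 0 ((cs.length / 3 * 3 : Nat) : Int) (by norm_num : (0:Int) < 3)]
  by_cases hpos : 0 < cs.length / 3 * 3
  · have hlt : (0 : Int) < ((cs.length / 3 * 3 : Nat) : Int) := by exact_mod_cast hpos
    rw [if_pos hlt]
    have hcnt : ((((cs.length / 3 * 3 : Nat) : Int) - 0 + 3 - 1) / 3).toNat = cs.length / 3 := by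
      have h1 : ((cs.length / 3 * 3 : Nat) : Int) - 0 + 3 - 1 = ((cs.length / 3 * 3 + 2 : Nat) : Int) := by
        push_cast; ring
      rw [h1, show (3:Int) = ((3:Nat):Int) from rfl, ← Int.natCast_ediv]
      simp
      omega
    rw [hcnt, List.map_map]
    apply List.map_congr_left
    intro k hk
    simp only [Function.comp]
    have hsl : PySem.List.slice cs (some (0 + 3 * (k : Int))) (some (0 + 3 * (k : Int) + 3))
        = (cs.drop (3 * k)).take 3 := by
      rw [PySem.List.slice_toNat cs (by positivity) (by positivity)]
      have e1 : ((0:Int) + 3 * (k : Int) + 3).toNat - ((0:Int) + 3 * (k : Int)).toNat = 3 := by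
        omega
      have e2 : ((0:Int) + 3 * (k : Int)).toNat = 3 * k := by omega
      rw [e1, e2]
    rw [hsl]
  · have hz : cs.length / 3 * 3 = 0 := by omega
    have hz' : cs.length / 3 = 0 := by omega
    rw [hz, hz']
    simp

-- ===== VERDICT (by name: the statement is the Claim_ definition above) =====
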